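-- pv_equiv track=rewrite | github.com/naguri17/NT2205 | week02-code/week2/MonoalphabeticCryptanalysis.t.py | a1z26_attack
-- ===== SOURCE A (Python) =====
-- import string
--
-- ALPHABET = string.ascii_uppercase
--
-- def a1z26_attack(cipher: str):
--     # Try to map numbers to letters assuming space separated numbers
--     tokens = cipher.strip().split()
--     if all(token.isdigit() for token in tokens):
--         try:
--             letters = [ALPHABET[int(t)-1] for t in tokens]
--             return ''.join(letters)
--         except Exception:
--             return None
--     # fallback: try to extract numbers from string
--     nums = []
--     cur = ''
--     for ch in cipher:
--         if ch.isdigit():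
--             cur += ch
--         else:
--             if cur:
--                 nums.append(cur)
--                 cur=''
--     if cur:
--         nums.append(cur)
--     if nums:
--         try:
--             return ''.join(ALPHABET[int(n)-1] for n in nums)
--         except Exception:
--             return None
--     return None
-- ===== SOURCE B (Python) =====
-- import string
--
-- ALPHABET = string.ascii_uppercase
--
-- def a1z26_attack(cipher: str):
--     # One linear scan: mask every non-digit to a space and split, so the maximal
--     # digit runs serve both A's space-separated fast path and its fallback at once.
--     if not cipher.strip():
--         return ''
--     nums = ''.join(ch if ch.isdigit() else ' ' for ch in cipher).split()
--     if not nums: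
--         return None
--     try:
--         return ''.join(ALPHABET[int(n) - 1] for n in nums)
--     except IndexError:
--         return None
-- ===== Notes on version B (the rewrite author's own statement) =====
-- stated objective: simpler
-- what changed: Replaces A's two-phase structure (tokenize-and-check-all-digits fast path plus a manual accumulator loop extracting digit runs as fallback) with one mask-then-split pass: non-digits become spaces and a single split yields the digit runs that serve both cases.
import Mathlib
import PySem

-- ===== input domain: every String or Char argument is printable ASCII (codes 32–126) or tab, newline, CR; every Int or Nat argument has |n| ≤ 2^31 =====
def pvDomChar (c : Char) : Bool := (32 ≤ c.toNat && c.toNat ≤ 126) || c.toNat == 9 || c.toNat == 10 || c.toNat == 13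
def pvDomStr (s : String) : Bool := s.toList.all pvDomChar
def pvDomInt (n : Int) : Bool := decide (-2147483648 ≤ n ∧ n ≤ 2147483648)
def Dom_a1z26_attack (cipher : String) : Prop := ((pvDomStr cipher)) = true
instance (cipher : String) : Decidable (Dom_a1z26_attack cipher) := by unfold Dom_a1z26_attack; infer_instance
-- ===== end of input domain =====

-- B replaces A's two-phase structure (all-digit-token fast path plus a manual
-- accumulator loop extracting digit runs) with one mask-non-digits-to-space-then-split
-- pass; objective: simpler.


-- ALPHABET, and ALPHABET[int(t)-1] for each token (the same expression in both
-- Pythons); none exactly where Python's comprehension raises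
def pvAlpha : List Char := "ABCDEFGHIJKLMNOPQRSTUVWXYZ".toList

def pvDecode (ts : List (List Char)) : Option (List Char) :=
  ts.mapM (fun t => (PySem.Int.ofChars? t).bind (fun k => PySem.List.pyGet? pvAlpha (k - 1)))

-- ===== PORT A =====

-- one step of A's fallback loop over the characters: state = (nums, cur)
def pvStepA (st : List (List Char) × List Char) (ch : Char) : List (List Char) × List Char :=
  if PySem.Chars.isdigit ch then (st.1, st.2 ++ [ch])
  else if !st.2.isEmpty then (st.1 ++ [st.2], []) else st

def a1z26_attack (cipher : String) : Option String :=
  let tokens := PySem.Chars.split₀ (PySem.Chars.strip cipher.toList)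
  if tokens.all PySem.Chars.strIsdigit then
    (pvDecode tokens).map String.ofList
  else
    let st := cipher.toList.foldl pvStepA ([], [])
    let nums := if !st.2.isEmpty then st.1 ++ [st.2] else st.1
    if !nums.isEmpty then (pvDecode nums).map String.ofList else none

-- ===== PORT B =====
def pvMaskB (ch : Char) : Char := if PySem.Chars.isdigit ch then ch else ' '

def a1z26_attack_alt (cipher : String) : Option String :=
  if (PySem.Chars.strip cipher.toList).isEmpty then some ""
  else
    let nums := PySem.Chars.split₀ (cipher.toList.map pvMaskB)
    if nums.isEmpty then none
    else (pvDecode nums).map String.ofList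

-- ===== PRECONDITION & SPEC =====
def Spec_a1z26_attack (cipher : String) (out : Option String) : Prop := out = a1z26_attack_alt cipher
instance (cipher : String) (out : Option String) : Decidable (Spec_a1z26_attack cipher out) := by unfold Spec_a1z26_attack; infer_instance

-- ===== CLAIM (what is proved, stated in full; the proofs are below) =====
def Claim_equal_a1z26_attack : Prop := ∀ (cipher : String), Dom_a1z26_attack cipher → Spec_a1z26_attack cipher (a1z26_attack cipher)

-- ===== LEMMAS AND PROOFS =====

theorem pvIsspace_of_isdigit (c : Char) (h : PySem.Chars.isdigit c = true) :
    PySem.Chars.isspace c = false := by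
  simp only [PySem.Chars.isdigit, Bool.and_eq_true, decide_eq_true_eq, Char.le_def,
    UInt32.le_iff_toNat_le] at h
  have e0 : '0'.val.toNat = 48 := rfl
  have e9 : '9'.val.toNat = 57 := rfl
  rw [e0, e9] at h
  simp only [PySem.Chars.isspace, Char.toNat]
  simp only [Bool.or_eq_false_iff, Bool.and_eq_false_iff, decide_eq_false_iff_not]
  omega

-- A's fallback loop (plus the final flush) computes split₀ of the masked string.
theorem pvGoFold (cs : List Char) (nums : List (List Char)) (cur : List Char) :
    PySem.Chars.split₀.go (cs.map pvMaskB) cur.reverse nums.reverse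
      = (let st := cs.foldl pvStepA (nums, cur);
         if !st.2.isEmpty then st.1 ++ [st.2] else st.1) := by
  induction cs generalizing nums cur with
  | nil =>
      simp only [List.map_nil, PySem.Chars.split₀.go, List.foldl_nil]
      by_cases hc : cur.isEmpty <;> simp [hc]
  | cons c cs ih =>
      by_cases hd : PySem.Chars.isdigit c
      · have hm : pvMaskB c = c := by simp [pvMaskB, hd]
        have hs := pvIsspace_of_isdigit c hd
        simp only [List.map_cons, hm, PySem.Chars.split₀.go, hs, Bool.false_eq_true, if_false,
          List.foldl_cons, pvStepA, hd, if_true]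
        have : (c :: cur.reverse) = (cur ++ [c]).reverse := by simp
        rw [this, ih nums (cur ++ [c])]
      · have hm : pvMaskB c = ' ' := by simp [pvMaskB, hd]
        have hs : PySem.Chars.isspace ' ' = true := by decide
        by_cases hc : cur.isEmpty
        · have hce : cur = [] := by simpa [List.isEmpty_iff] using hc
          simp only [List.map_cons, hm, PySem.Chars.split₀.go, hs, if_true, hce,
            List.reverse_nil, List.isEmpty_nil, List.foldl_cons, pvStepA, hd,
            Bool.false_eq_true, if_false]
          exact ih nums []
        · have hcf : cur.isEmpty = false := by simpa using hc
          have h2 := ih (nums ++ [cur]) []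
          simp only [List.reverse_nil, List.reverse_append, List.reverse_cons,
            List.nil_append, List.reverse_nil] at h2
          simp only [List.map_cons, hm, PySem.Chars.split₀.go, hs, if_true,
            List.isEmpty_reverse, hcf, Bool.false_eq_true, if_false, List.reverse_reverse,
            List.foldl_cons, pvStepA, hd, Bool.not_false]
          exact h2

-- leading whitespace does not change split₀.go (with empty current run)
theorem pvGoLstrip (cs : List Char) (acc : List (List Char)) :
    PySem.Chars.split₀.go (cs.dropWhile PySem.Chars.isspace) [] acc
      = PySem.Chars.split₀.go cs [] acc := by
  induction cs with
  | nil => rfl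
  | cons c cs ih =>
      by_cases hs : PySem.Chars.isspace c
      · simp only [List.dropWhile_cons, hs, if_true, ih, PySem.Chars.split₀.go,
          List.isEmpty_nil]
      · simp [hs]

-- split₀.go over all-whitespace input just flushes
theorem pvGoSpaces (ws : List Char) (hws : ws.all PySem.Chars.isspace = true)
    (cur : List Char) (acc : List (List Char)) :
    PySem.Chars.split₀.go ws cur acc
      = if cur.isEmpty then acc.reverse else (cur.reverse :: acc).reverse := by
  induction ws generalizing cur acc with
  | nil => simp [PySem.Chars.split₀.go]
  | cons w ws ih =>
      simp only [List.all_cons, Bool.and_eq_true] at hws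
      by_cases hc : cur.isEmpty <;>
        simp [PySem.Chars.split₀.go, hws.1, hc, ih hws.2]

-- trailing whitespace does not change split₀.go
theorem pvGoAppendSpaces (bs ws : List Char) (hws : ws.all PySem.Chars.isspace = true)
    (cur : List Char) (acc : List (List Char)) :
    PySem.Chars.split₀.go (bs ++ ws) cur acc = PySem.Chars.split₀.go bs cur acc := by
  induction bs generalizing cur acc with
  | nil =>
      simp only [List.nil_append]
      rw [pvGoSpaces ws hws cur acc]
      simp [PySem.Chars.split₀.go]
  | cons b bs ih =>
      simp only [List.cons_append, PySem.Chars.split₀.go]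
      by_cases hs : PySem.Chars.isspace b <;> by_cases hc : cur.isEmpty <;>
        simp [hs, hc, ih]

-- stripping does not change the tokens
theorem pvSplitStrip (cs : List Char) :
    PySem.Chars.split₀ (PySem.Chars.strip cs) = PySem.Chars.split₀ cs := by
  unfold PySem.Chars.split₀ PySem.Chars.strip PySem.Chars.rstrip PySem.Chars.lstrip
  set m := cs.dropWhile PySem.Chars.isspace with hm
  have hdecomp : (m.reverse.dropWhile PySem.Chars.isspace).reverse
      ++ (m.reverse.takeWhile PySem.Chars.isspace).reverse = m := by
    rw [← List.reverse_append, List.takeWhile_append_dropWhile, List.reverse_reverse]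
  have hall : ((m.reverse.takeWhile PySem.Chars.isspace).reverse).all PySem.Chars.isspace = true := by
    simp only [List.all_reverse]
    exact List.all_takeWhile
  calc PySem.Chars.split₀.go (m.reverse.dropWhile PySem.Chars.isspace).reverse [] []
      = PySem.Chars.split₀.go ((m.reverse.dropWhile PySem.Chars.isspace).reverse
          ++ (m.reverse.takeWhile PySem.Chars.isspace).reverse) [] [] := by
        rw [pvGoAppendSpaces _ _ hall]
    _ = PySem.Chars.split₀.go m [] [] := by rw [hdecomp]
    _ = PySem.Chars.split₀.go cs [] [] := pvGoLstrip cs []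

-- every element of acc survives into the result of split₀.go
theorem pvMemAcc (cs : List Char) (cur : List Char) (acc : List (List Char))
    (a : List Char) (ha : a ∈ acc) : a ∈ PySem.Chars.split₀.go cs cur acc := by
  induction cs generalizing cur acc with
  | nil =>
      by_cases hc : cur.isEmpty <;> simp [PySem.Chars.split₀.go, hc, ha]
  | cons c cs ih =>
      by_cases hs : PySem.Chars.isspace c
      · by_cases hc : cur.isEmpty
        · simpa [PySem.Chars.split₀.go, hs, hc] using ih [] acc ha
        · simpa [PySem.Chars.split₀.go, hs, hc] using
            ih [] (cur.reverse :: acc) (by simp [ha])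
      · simpa [PySem.Chars.split₀.go, hs] using ih (c :: cur) acc ha

-- every character of the current run ends up inside some token
theorem pvMemCur (cs : List Char) (cur : List Char) (acc : List (List Char))
    (c : Char) (hc : c ∈ cur) : ∃ t ∈ PySem.Chars.split₀.go cs cur acc, c ∈ t := by
  induction cs generalizing cur acc with
  | nil =>
      have hne : cur.isEmpty = false := by
        cases cur with
        | nil => cases hc
        | cons _ _ => rfl
      refine ⟨cur.reverse, ?_, by simpa using hc⟩
      simp [PySem.Chars.split₀.go, hne]
  | cons d cs ih =>
      by_cases hs : PySem.Chars.isspace d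
      · have hne : cur.isEmpty = false := by
          cases cur with
          | nil => cases hc
          | cons _ _ => rfl
        refine ⟨cur.reverse, ?_, by simpa using hc⟩
        simp only [PySem.Chars.split₀.go, hs, if_true, hne, Bool.false_eq_true, if_false]
        exact pvMemAcc cs [] _ _ (by simp)
      · simpa [PySem.Chars.split₀.go, hs] using ih (d :: cur) acc (by simp [hc])

-- every non-whitespace character of the input lies in some token of split₀.go
theorem pvMemToken (cs : List Char) (cur : List Char) (acc : List (List Char))
    (c : Char) (hc : c ∈ cs) (hns : PySem.Chars.isspace c = false) :
    ∃ t ∈ PySem.Chars.split₀.go cs cur acc, c ∈ t := by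
  induction cs generalizing cur acc with
  | nil => cases hc
  | cons d cs ih =>
      rcases List.mem_cons.mp hc with rfl | hmem
      · simpa [PySem.Chars.split₀.go, hns] using pvMemCur cs (c :: cur) acc c (by simp)
      · by_cases hs : PySem.Chars.isspace d
        · by_cases hcur : cur.isEmpty
          · simpa [PySem.Chars.split₀.go, hs, hcur] using ih [] acc hmem
          · simpa [PySem.Chars.split₀.go, hs, hcur] using ih [] (cur.reverse :: acc) hmem
        · simpa [PySem.Chars.split₀.go, hs] using ih (d :: cur) acc hmem

-- if all tokens are digit strings, every character is whitespace or a digit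
theorem pvAllDigitChars (cs : List Char)
    (hall : (PySem.Chars.split₀ cs).all PySem.Chars.strIsdigit = true)
    (c : Char) (hc : c ∈ cs) :
    PySem.Chars.isspace c = true ∨ PySem.Chars.isdigit c = true := by
  by_cases hs : PySem.Chars.isspace c
  · exact Or.inl hs
  · right
    obtain ⟨t, ht, hct⟩ := pvMemToken cs [] [] c hc (by simpa using hs)
    have := List.all_eq_true.mp hall t ht
    simp only [PySem.Chars.strIsdigit, Bool.and_eq_true, List.all_eq_true] at this
    exact this.2 c hct

-- when every character is whitespace-or-digit, masking changes nothing for split₀.go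
theorem pvGoMaskId (cs : List Char)
    (h : ∀ c ∈ cs, PySem.Chars.isspace c = true ∨ PySem.Chars.isdigit c = true)
    (cur : List Char) (acc : List (List Char)) :
    PySem.Chars.split₀.go (cs.map pvMaskB) cur acc = PySem.Chars.split₀.go cs cur acc := by
  induction cs generalizing cur acc with
  | nil => rfl
  | cons c cs ih =>
      have hcs : ∀ d ∈ cs, PySem.Chars.isspace d = true ∨ PySem.Chars.isdigit d = true :=
        fun d hd => h d (List.mem_cons_of_mem _ hd)
      by_cases hd : PySem.Chars.isdigit c
      · have hm : pvMaskB c = c := by simp [pvMaskB, hd]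
        have hs := pvIsspace_of_isdigit c hd
        simp [PySem.Chars.split₀.go, hm, hs, ih hcs]
      · have hsp : PySem.Chars.isspace c = true := by
          rcases h c (by simp) with h' | h'
          · exact h'
          · exact absurd h' hd
        have hm : pvMaskB c = ' ' := by simp [pvMaskB, hd]
        have hs : PySem.Chars.isspace ' ' = true := by decide
        by_cases hc : cur.isEmpty <;>
          simp [PySem.Chars.split₀.go, hm, hs, hsp, hc, ih hcs]

-- split₀.go is nonempty as soon as a non-whitespace character occurs
theorem pvGoNeNil (cs : List Char) (cur : List Char) (acc : List (List Char))
    (h : acc ≠ [] ∨ cur ≠ [] ∨ ∃ c ∈ cs, PySem.Chars.isspace c = false) :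
    PySem.Chars.split₀.go cs cur acc ≠ [] := by
  induction cs generalizing cur acc with
  | nil =>
      rcases h with h | h | h
      · by_cases hc : cur.isEmpty <;> simp [PySem.Chars.split₀.go, hc, h]
      · have hc : cur.isEmpty = false := by simpa [List.isEmpty_iff] using h
        simp [PySem.Chars.split₀.go, hc]
      · obtain ⟨c, hc, _⟩ := h; cases hc
  | cons c cs ih =>
      by_cases hs : PySem.Chars.isspace c
      · by_cases hc : cur.isEmpty
        · have hce : cur = [] := by simpa [List.isEmpty_iff] using hc
          simp only [PySem.Chars.split₀.go, hs, if_true, hc]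
          apply ih
          rcases h with h | h | h
          · exact Or.inl h
          · exact absurd hce h
          · obtain ⟨d, hd, hdn⟩ := h
            rcases List.mem_cons.mp hd with rfl | hmem
            · rw [hs] at hdn; cases hdn
            · exact Or.inr (Or.inr ⟨d, hmem, hdn⟩)
        · simp only [PySem.Chars.split₀.go, hs, if_true, hc, Bool.false_eq_true, if_false]
          exact ih _ _ (Or.inl (by simp))
      · simp only [PySem.Chars.split₀.go, hs, Bool.false_eq_true, if_false]
        exact ih _ _ (Or.inr (Or.inl (by simp)))

-- if dropWhile returns a cons, its head fails the predicate
theorem pvDropWhileHead (p : Char → Bool) (l : List Char) (c : Char) (r : List Char)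
    (h : l.dropWhile p = c :: r) : p c = false := by
  have h2 := List.head_dropWhile_not p (l := l) (by simp [h])
  simp [h] at h2
  exact h2

-- a nonempty stripped string starts with a non-whitespace character
theorem pvStripHead (cs : List Char) (h : (PySem.Chars.strip cs).isEmpty = false) :
    ∃ c ∈ PySem.Chars.strip cs, PySem.Chars.isspace c = false := by
  have hpre : PySem.Chars.strip cs <+: PySem.Chars.lstrip cs := by
    unfold PySem.Chars.strip PySem.Chars.rstrip
    have hsfx : ((PySem.Chars.lstrip cs).reverse.dropWhile PySem.Chars.isspace)
        <:+ (PySem.Chars.lstrip cs).reverse := List.dropWhile_suffix _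
    simpa using List.reverse_prefix.mpr hsfx
  obtain ⟨d, rest, hdr⟩ : ∃ d rest, PySem.Chars.strip cs = d :: rest := by
    cases hs : PySem.Chars.strip cs with
    | nil => rw [hs] at h; cases h
    | cons d rest => exact ⟨d, rest, rfl⟩
  obtain ⟨suf, hsuf⟩ := hpre
  have hdw : cs.dropWhile PySem.Chars.isspace = d :: (rest ++ suf) := by
    have : PySem.Chars.lstrip cs = d :: (rest ++ suf) := by rw [← hsuf, hdr]; simp
    exact this
  exact ⟨d, by rw [hdr]; simp, pvDropWhileHead _ _ _ _ hdw⟩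

-- ===== VERDICT (by name: the statement is the Claim_ definition above) =====
theorem a1z26_attack_spec : Claim_equal_a1z26_attack := by
  intro cipher _
  unfold Spec_a1z26_attack a1z26_attack a1z26_attack_alt
  set cs := cipher.toList with hcs
  have hfold : PySem.Chars.split₀ (cs.map pvMaskB)
      = (let st := cs.foldl pvStepA (([], []) : List (List Char) × List Char);
         if !st.2.isEmpty then st.1 ++ [st.2] else st.1) := by
    unfold PySem.Chars.split₀
    exact pvGoFold cs [] []
  by_cases hsempty : (PySem.Chars.strip cs).isEmpty
  · have hse : PySem.Chars.strip cs = [] := by simpa [List.isEmpty_iff] using hsempty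
    simp [hse, PySem.Chars.split₀, PySem.Chars.split₀.go, pvDecode]
  · have hsf : (PySem.Chars.strip cs).isEmpty = false := by simpa using hsempty
    have hT : PySem.Chars.split₀ (PySem.Chars.strip cs) = PySem.Chars.split₀ cs :=
      pvSplitStrip cs
    by_cases hall : (PySem.Chars.split₀ (PySem.Chars.strip cs)).all PySem.Chars.strIsdigit
    · -- fast path: tokens = digit runs, and they are nonempty
      have hcd : ∀ c ∈ cs, PySem.Chars.isspace c = true ∨ PySem.Chars.isdigit c = true :=
        pvAllDigitChars cs (hT ▸ hall)
      have hmask : PySem.Chars.split₀ (cs.map pvMaskB) = PySem.Chars.split₀ cs := by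
        unfold PySem.Chars.split₀
        exact pvGoMaskId cs hcd [] []
      have hne : PySem.Chars.split₀ (PySem.Chars.strip cs) ≠ [] := by
        obtain ⟨c, hc, hcn⟩ := pvStripHead cs hsf
        exact pvGoNeNil _ [] [] (Or.inr (Or.inr ⟨c, hc, hcn⟩))
      have hneB : (PySem.Chars.split₀ (cs.map pvMaskB)).isEmpty = false := by
        rw [hmask, ← hT]
        simpa [List.isEmpty_iff] using hne
      have hneT : (PySem.Chars.split₀ (PySem.Chars.strip cs)).isEmpty = false := by
        simpa [List.isEmpty_iff] using hne
      simp only [hall, if_true, hsf, Bool.false_eq_true, if_false, hmask, ← hT,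
        pvDecode, hneT]
    · -- fallback: A extracts the digit runs by hand, B by mask-and-split
      have hallf : (PySem.Chars.split₀ (PySem.Chars.strip cs)).all PySem.Chars.strIsdigit
          = false := by simpa using hall
      simp only [hallf, Bool.false_eq_true, if_false, hsf, ← hfold, pvDecode]
      by_cases hn : (PySem.Chars.split₀ (cs.map pvMaskB)).isEmpty
      · simp [hn]
      · simp [hn]
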